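-- pv_equiv track=rewrite | github.com/cnam0203/artery_reconstruction | open_mesh.py | get_unique_edges
-- ===== SOURCE A (Python) =====
-- def get_unique_edges(faces):
--     edge_count = {}
--
--     # Iterate over each face and extract edges
--     for face in faces:
--         # Create edges, ensuring each edge is represented in sorted order (to avoid directional differences)
--         edges = [(min(face[i], face[(i + 1) % 3]), max(face[i], face[(i + 1) % 3])) for i in range(3)]
--
--         for edge in edges:
--             if edge in edge_count:
--                 edge_count[edge] += 1
--             else:
--                 edge_count[edge] = 1
--
--     # Select edges that occur only once
--     unique_edges = [edge for edge, count in edge_count.items() if count == 1]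
--
--     return unique_edges
-- ===== SOURCE B (Python) =====
-- def get_unique_edges(faces):
--     # Membership toggling instead of counting: an edge seen once sits in
--     # seen_once (insertion order); on its second appearance it moves to
--     # seen_more and never returns.
--     seen_once = {}
--     seen_more = set()
--     for a, b, c in faces:
--         for u, v in ((a, b), (b, c), (c, a)):
--             e = (u, v) if u <= v else (v, u)
--             if e in seen_once:
--                 del seen_once[e]
--                 seen_more.add(e)
--             elif e not in seen_more:
--                 seen_once[e] = True
--     return list(seen_once)
-- ===== Notes on version B (the rewrite author's own statement) =====
-- stated objective: alternative
-- what changed: B keeps no counts: instead of A's edge->count dictionary filtered for count==1 at the end, B toggles membership between an insertion-ordered dict of edges seen exactly once and a set of edges seen more than once, returning the dict's keys directly.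
import Mathlib
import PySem

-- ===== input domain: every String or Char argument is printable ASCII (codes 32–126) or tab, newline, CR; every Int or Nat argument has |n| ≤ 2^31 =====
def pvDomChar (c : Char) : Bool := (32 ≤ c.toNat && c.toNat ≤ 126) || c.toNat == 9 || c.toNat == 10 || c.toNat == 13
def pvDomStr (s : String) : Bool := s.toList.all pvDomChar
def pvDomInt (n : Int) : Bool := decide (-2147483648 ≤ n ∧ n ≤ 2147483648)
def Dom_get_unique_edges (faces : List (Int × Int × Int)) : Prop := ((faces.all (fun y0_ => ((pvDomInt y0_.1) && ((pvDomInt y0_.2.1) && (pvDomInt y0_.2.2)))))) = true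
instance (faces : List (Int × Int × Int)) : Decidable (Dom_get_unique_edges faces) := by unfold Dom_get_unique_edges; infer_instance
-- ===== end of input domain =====

-- B replaces A's count dictionary by pure membership toggling (an ordered dict of
-- edges seen exactly once plus a set of edges seen more than once); alternative
-- decomposition, same cost, no counts kept.

-- ===== PORT A =====
-- inner loop body of A: count each edge in the dict
def pvStepA (d : PySem.Dict (Int × Int) Int) (e : Int × Int) : PySem.Dict (Int × Int) Int :=
  if d.contains e then d.modify e 0 (· + 1) else d.insert e 1

def get_unique_edges (faces : List (Int × Int × Int)) : List (Int × Int) :=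
  let edge_count := faces.foldl (fun d face =>
    ([(min face.1 face.2.1, max face.1 face.2.1),
      (min face.2.1 face.2.2, max face.2.1 face.2.2),
      (min face.2.2 face.1, max face.2.2 face.1)]).foldl pvStepA d) PySem.Dict.empty
  (edge_count.items.filter (fun p => p.2 == (1 : Int))).map (fun p => p.1)

-- ===== PORT B =====
-- inner loop body of B: normalise the pair, then toggle membership
def pvStepB (s : PySem.Dict (Int × Int) Bool × PySem.Set (Int × Int)) (uv : Int × Int) :
    PySem.Dict (Int × Int) Bool × PySem.Set (Int × Int) :=
  let e := if uv.1 ≤ uv.2 then uv else (uv.2, uv.1)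
  if s.1.contains e then (s.1.erase e, PySem.Set.add s.2 e)
  else if PySem.Set.contains s.2 e then s
  else (s.1.insert e true, s.2)

def get_unique_edges_alt (faces : List (Int × Int × Int)) : List (Int × Int) :=
  let s := faces.foldl (fun s f =>
    ([(f.1, f.2.1), (f.2.1, f.2.2), (f.2.2, f.1)]).foldl pvStepB s)
    (PySem.Dict.empty, PySem.Set.empty)
  s.1.keys

-- ===== PRECONDITION & SPEC =====
def Spec_get_unique_edges (faces : List (Int × Int × Int)) (out : List (Int × Int)) : Prop := out = get_unique_edges_alt faces
instance (faces : List (Int × Int × Int)) (out : List (Int × Int)) : Decidable (Spec_get_unique_edges faces out) := by unfold Spec_get_unique_edges; infer_instance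

-- ===== CLAIM (what is proved, stated in full; the proofs are below) =====
def Claim_equal_get_unique_edges : Prop := ∀ (faces : List (Int × Int × Int)), Dom_get_unique_edges faces → Spec_get_unique_edges faces (get_unique_edges faces)

-- ===== LEMMAS AND PROOFS =====

-- The loop invariant tying A's counter d to B's pair (o, m):
--   o's items are exactly the count-1 items of d (in order, value true),
--   m holds exactly the keys counted at least twice,
--   d's keys are distinct and all counts are ≥ 1.
def pvINV (d : PySem.Dict (Int × Int) Int) (o : PySem.Dict (Int × Int) Bool)
    (m : PySem.Set (Int × Int)) : Prop :=
  o.items = (d.items.filter (fun p => p.2 == (1 : Int))).map (fun p => (p.1, true))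
  ∧ (∀ e v, (e, v) ∈ d.items → 2 ≤ v → e ∈ m)
  ∧ (∀ e, e ∈ m → ∃ v, (e, v) ∈ d.items ∧ 2 ≤ v)
  ∧ (d.items.map (fun p => p.1)).Nodup
  ∧ (∀ p ∈ d.items, 1 ≤ p.2)

lemma pv_key_unique {α β : Type} [DecidableEq α] (l : List (α × β))
    (hnd : (l.map (fun p => p.1)).Nodup) {e : α} {v : β} (hm : (e, v) ∈ l) :
    ∀ q ∈ l, q.1 = e → q = (e, v) := by
  induction l with
  | nil => simp at hm
  | cons a t ih =>
    simp only [List.map_cons, List.nodup_cons] at hnd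
    intro q hq hqe
    rcases List.mem_cons.1 hm with hm1 | hm2
    · rcases List.mem_cons.1 hq with hq1 | hq2
      · rw [hq1, ← hm1]
      · exfalso
        apply hnd.1
        have hae : a.1 = q.1 := by rw [← hm1]; exact hqe.symm
        rw [hae]
        exact List.mem_map_of_mem hq2
    · rcases List.mem_cons.1 hq with hq1 | hq2
      · exfalso
        apply hnd.1
        have hae : a.1 = e := by rw [← hq1]; exact hqe
        rw [hae]
        exact List.mem_map.2 ⟨(e, v), hm2, rfl⟩
      · exact ih hnd.2 hm2 q hq2 hqe

lemma pv_filter_map_upd (l : List ((Int × Int) × Int)) (e : Int × Int) (v : Int)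
    (hv : 1 ≤ v) (hkey : ∀ p ∈ l, p.1 = e → p.2 = v) :
    (l.map (fun p => if p.1 == e then (e, v + 1) else p)).filter (fun p => p.2 == (1 : Int))
      = l.filter (fun p => !(p.1 == e) && p.2 == (1 : Int)) := by
  induction l with
  | nil => rfl
  | cons p t ih =>
    have ht : ∀ q ∈ t, q.1 = e → q.2 = v := fun q hq => hkey q (List.mem_cons_of_mem _ hq)
    simp only [List.map_cons, List.filter_cons, ih ht]
    by_cases hpe : p.1 = e
    · have hp2 : p.2 = v := hkey p (List.mem_cons_self) hpe
      simp [hpe, hp2, show v + 1 ≠ 1 by omega]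
    · by_cases h1 : p.2 = 1 <;> simp [hpe, h1]

lemma pv_keys_map_upd (l : List ((Int × Int) × Int)) (e : Int × Int) (w : Int) :
    ((l.map (fun p => if p.1 == e then (e, w) else p)).map (fun p => p.1))
      = l.map (fun p => p.1) := by
  rw [List.map_map]
  refine List.map_congr_left (fun p _ => ?_)
  by_cases h : p.1 = e <;> simp [h]

lemma pv_minmax (a b : Int) : (min a b, max a b) = if a ≤ b then (a, b) else (b, a) := by
  split_ifs with h <;> simp [min_def, max_def, h]

lemma pv_step_inv (d : PySem.Dict (Int × Int) Int) (o : PySem.Dict (Int × Int) Bool)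
    (m : PySem.Set (Int × Int)) (uv : Int × Int) (h : pvINV d o m) :
    pvINV (pvStepA d (if uv.1 ≤ uv.2 then uv else (uv.2, uv.1)))
      (pvStepB (o, m) uv).1 (pvStepB (o, m) uv).2 := by
  obtain ⟨h1, h2, h3, h4, h5⟩ := h
  simp only [pvStepA, pvStepB]
  generalize (if uv.1 ≤ uv.2 then uv else (uv.2, uv.1)) = e
  by_cases hA : d.contains e
  · -- e already counted in d, with value v ≥ 1
    simp only [PySem.Dict.contains, List.any_eq_true, beq_iff_eq] at hA
    obtain ⟨p, hp, hpe⟩ := hA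
    obtain ⟨v, hpv⟩ : ∃ v, p = (e, v) := ⟨p.2, by rw [← hpe]⟩
    subst hpv
    have hmem : (e, v) ∈ d.items := hp
    have hv1 : 1 ≤ v := h5 _ hmem
    have hkey : ∀ q ∈ d.items, q.1 = e → q.2 = v :=
      fun q hq hqe => congrArg Prod.snd (pv_key_unique d.items h4 hmem q hq hqe)
    have hcontA : d.contains e := by
      simp only [PySem.Dict.contains, List.any_eq_true]
      exact ⟨(e, v), hmem, by simp⟩
    have hgetD : d.getD e 0 = v := PySem.Dict.getD_of_mem_items d hmem h4 0
    rw [if_pos hcontA]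
    have hitems : (d.modify e 0 (· + 1)).items
        = d.items.map (fun p => if p.1 == e then (e, v + 1) else p) := by
      simp only [PySem.Dict.modify, hgetD]
      exact PySem.Dict.items_insert_of_contains d _ hcontA
    by_cases hv : v = 1
    · -- second appearance: B moves e from seen_once to seen_more
      subst hv
      have ho : o.contains e = true := by
        simp only [PySem.Dict.contains, List.any_eq_true, h1]
        exact ⟨(e, true), List.mem_map_of_mem (List.mem_filter.2 ⟨hmem, by simp⟩), by simp⟩
      rw [if_pos ho]
      refine ⟨?_, ?_, ?_, ?_, ?_⟩
      · -- items of o.erase e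
        show (o.erase e).items = _
        simp only [PySem.Dict.erase, hitems, pv_filter_map_upd d.items e 1 (by omega) hkey, h1,
          List.filter_map, List.filter_filter]
        rfl
      · intro e' v' hmem' hge
        rw [hitems] at hmem'
        rcases List.mem_map.1 hmem' with ⟨q, hq, hupd⟩
        rw [PySem.Set.mem_add]
        by_cases hqe : q.1 = e
        · simp only [hqe, beq_self_eq_true, if_true] at hupd
          right; exact (congrArg Prod.fst hupd).symm
        · simp only [beq_iff_eq, hqe, if_false] at hupd
          left; exact h2 e' v' (hupd ▸ hq) hge
      · intro a ha
        rcases (PySem.Set.mem_add m e a).1 ha with ha' | hae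
        · obtain ⟨w, hw, hw2⟩ := h3 a ha'
          have hane : a ≠ e := by
            intro hae; subst hae
            have := hkey (a, w) hw rfl; simp at this; omega
          refine ⟨w, ?_, hw2⟩
          rw [hitems]
          refine List.mem_map.2 ⟨(a, w), hw, by simp [hane]⟩
        · subst hae
          refine ⟨2, ?_, by omega⟩
          rw [hitems]
          exact List.mem_map.2 ⟨(a, 1), hmem, by simp⟩
      · rw [hitems, pv_keys_map_upd]; exact h4
      · intro p hp'
        rw [hitems] at hp'
        rcases List.mem_map.1 hp' with ⟨q, hq, hupd⟩
        by_cases hqe : q.1 = e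
        · simp only [hqe, beq_self_eq_true, if_true] at hupd; rw [← hupd]; simp
        · simp only [beq_iff_eq, hqe, if_false] at hupd; exact hupd ▸ h5 q hq
    · -- third-or-later appearance: B does nothing
      have hv2 : 2 ≤ v := by omega
      have ho : o.contains e = false := by
        simp only [PySem.Dict.contains, h1, List.any_eq_false]
        intro q hq
        rcases List.mem_map.1 hq with ⟨r, hr, hrq⟩
        rcases List.mem_filter.1 hr with ⟨hrmem, hr1⟩
        simp only [beq_iff_eq] at hr1
        intro hqe
        have : r.1 = e := by rw [← hrq] at hqe; simpa using hqe
        have := hkey r hrmem this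
        omega
      have hm : PySem.Set.contains m e = true :=
        (PySem.Set.contains_iff m e).2 (h2 e v hmem hv2)
      rw [ho]; simp only [Bool.false_eq_true, if_false, hm, if_true]
      refine ⟨?_, ?_, ?_, ?_, ?_⟩
      · rw [h1, hitems, pv_filter_map_upd d.items e v hv1 hkey]
        congr 1
        refine List.filter_congr (fun q hq => ?_)
        by_cases hqe : q.1 = e
        · have := hkey q hq hqe; simp [hqe, this, hv]
        · simp [hqe]
      · intro e' v' hmem' hge
        rw [hitems] at hmem'
        rcases List.mem_map.1 hmem' with ⟨q, hq, hupd⟩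
        by_cases hqe : q.1 = e
        · have : e' = e := by
            simp only [hqe, beq_self_eq_true, if_true] at hupd
            exact (congrArg Prod.fst hupd).symm
          exact this ▸ h2 e v hmem hv2
        · simp only [beq_iff_eq, hqe, if_false] at hupd
          exact h2 e' v' (hupd ▸ hq) hge
      · intro a ha
        obtain ⟨w, hw, hw2⟩ := h3 a ha
        by_cases hae : a = e
        · subst hae
          have hwv : w = v := hkey (a, w) hw rfl
          refine ⟨v + 1, ?_, by omega⟩
          rw [hitems]
          exact List.mem_map.2 ⟨(a, w), hw, by simp⟩
        · refine ⟨w, ?_, hw2⟩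
          rw [hitems]
          exact List.mem_map.2 ⟨(a, w), hw, by simp [hae]⟩
      · rw [hitems, pv_keys_map_upd]; exact h4
      · intro p hp'
        rw [hitems] at hp'
        rcases List.mem_map.1 hp' with ⟨q, hq, hupd⟩
        by_cases hqe : q.1 = e
        · simp only [hqe, beq_self_eq_true, if_true] at hupd; rw [← hupd]; simp; omega
        · simp only [beq_iff_eq, hqe, if_false] at hupd; exact hupd ▸ h5 q hq
  · -- first appearance: both append
    have hA' : d.contains e = false := by simpa using hA
    have hkeys : e ∉ d.items.map (fun p => p.1) := by
      simp only [PySem.Dict.contains, List.any_eq_false] at hA'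
      intro hk
      rcases List.mem_map.1 hk with ⟨q, hq, hqe⟩
      exact absurd (by simpa using hqe) (by simpa using hA' q hq)
    have ho : o.contains e = false := by
      simp only [PySem.Dict.contains, h1, List.any_eq_false]
      intro q hq
      rcases List.mem_map.1 hq with ⟨r, hr, hrq⟩
      rcases List.mem_filter.1 hr with ⟨hrmem, -⟩
      intro hqe
      exact hkeys (List.mem_map.2 ⟨r, hrmem, by rw [← hrq] at hqe; simpa using hqe⟩)
    have hm : PySem.Set.contains m e = false := by
      rw [← Bool.not_eq_true, (PySem.Set.contains_iff m e)]
      intro hmm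
      obtain ⟨w, hw, -⟩ := h3 e hmm
      exact hkeys (List.mem_map.2 ⟨(e, w), hw, rfl⟩)
    rw [if_neg (by simpa using hA)]
    simp only [ho, Bool.false_eq_true, if_false, hm]
    have hitems : (d.insert e 1).items = d.items ++ [(e, 1)] :=
      PySem.Dict.items_insert_of_not_contains d 1 hA'
    have hoitems : (o.insert e true).items = o.items ++ [(e, true)] :=
      PySem.Dict.items_insert_of_not_contains o true ho
    refine ⟨?_, ?_, ?_, ?_, ?_⟩
    · rw [hoitems, hitems, List.filter_append, List.map_append, h1]; rfl
    · intro e' v' hmem' hge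
      rw [hitems] at hmem'
      rcases List.mem_append.1 hmem' with hold | hnew
      · exact h2 e' v' hold hge
      · simp at hnew; omega
    · intro a ha
      obtain ⟨w, hw, hw2⟩ := h3 a ha
      exact ⟨w, by rw [hitems]; exact List.mem_append_left _ hw, hw2⟩
    · rw [hitems, List.map_append]
      refine List.Nodup.append h4 (List.nodup_singleton _) ?_
      intro x hx hx'
      simp only [List.map_cons, List.map_nil, List.mem_cons, List.not_mem_nil, or_false] at hx'
      subst hx'
      exact hkeys hx
    · intro p hp'
      rw [hitems] at hp'
      rcases List.mem_append.1 hp' with hold | hnew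
      · exact h5 p hold
      · simp at hnew; simp [hnew]

lemma pv_fold_inv (faces : List (Int × Int × Int)) (d : PySem.Dict (Int × Int) Int)
    (o : PySem.Dict (Int × Int) Bool) (m : PySem.Set (Int × Int)) (h : pvINV d o m) :
    pvINV
      (faces.foldl (fun d face =>
        ([(min face.1 face.2.1, max face.1 face.2.1),
          (min face.2.1 face.2.2, max face.2.1 face.2.2),
          (min face.2.2 face.1, max face.2.2 face.1)]).foldl pvStepA d) d)
      (faces.foldl (fun s f =>
        ([(f.1, f.2.1), (f.2.1, f.2.2), (f.2.2, f.1)]).foldl pvStepB s) (o, m)).1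
      (faces.foldl (fun s f =>
        ([(f.1, f.2.1), (f.2.1, f.2.2), (f.2.2, f.1)]).foldl pvStepB s) (o, m)).2 := by
  induction faces generalizing d o m with
  | nil => exact h
  | cons f t ih =>
    simp only [List.foldl_cons, List.foldl_nil, pv_minmax] at ih ⊢
    exact ih _ _ _ (pv_step_inv _ _ _ (f.2.2, f.1)
      (pv_step_inv _ _ _ (f.2.1, f.2.2) (pv_step_inv _ _ _ (f.1, f.2.1) h)))

-- ===== VERDICT (by name: the statement is the Claim_ definition above) =====
theorem get_unique_edges_spec : Claim_equal_get_unique_edges := by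
  intro faces _
  unfold Spec_get_unique_edges get_unique_edges get_unique_edges_alt
  have h := pv_fold_inv faces PySem.Dict.empty PySem.Dict.empty PySem.Set.empty
    (by refine ⟨rfl, ?_, ?_, ?_, ?_⟩ <;> simp [PySem.Dict.empty, PySem.Set.empty])
  obtain ⟨h1, -⟩ := h
  simp only [PySem.Dict.keys, h1, List.map_map]
  rfl
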